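-- pv_equiv track=rewrite | github.com/heijp06/AoC-2015 | day19/lib.py | replace_all
-- ===== SOURCE A (Python) =====
-- def replace_all(molecule, replacements):
--     new_molecules = set()
--     for pattern, replacement in replacements:
--         start = 0
--         pos = molecule.find(pattern, start)
--         while pos >= 0:
--             new_molecule = molecule[:pos] + \
--                 replacement + molecule[pos + len(pattern):]
--             new_molecules.add(new_molecule)
--             start = pos + len(pattern)
--             pos = molecule.find(pattern, start)
--     return new_molecules
-- ===== SOURCE B (Python) =====
-- def replace_all(molecule, replacements):
--     new_molecules = set()
--     for pattern, replacement in replacements: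
--         parts = molecule.split(pattern)
--         for k in range(1, len(parts)):
--             new_molecules.add(pattern.join(parts[:k]) +
--                               replacement + pattern.join(parts[k:]))
--     return new_molecules
-- ===== Notes on version B (the rewrite author's own statement) =====
-- stated objective: alternative
-- what changed: B splits the molecule once per pattern and rebuilds each result by rejoining the segment list around one boundary, instead of A's repeated find/slice scan from an advancing start index.
import Mathlib
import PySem

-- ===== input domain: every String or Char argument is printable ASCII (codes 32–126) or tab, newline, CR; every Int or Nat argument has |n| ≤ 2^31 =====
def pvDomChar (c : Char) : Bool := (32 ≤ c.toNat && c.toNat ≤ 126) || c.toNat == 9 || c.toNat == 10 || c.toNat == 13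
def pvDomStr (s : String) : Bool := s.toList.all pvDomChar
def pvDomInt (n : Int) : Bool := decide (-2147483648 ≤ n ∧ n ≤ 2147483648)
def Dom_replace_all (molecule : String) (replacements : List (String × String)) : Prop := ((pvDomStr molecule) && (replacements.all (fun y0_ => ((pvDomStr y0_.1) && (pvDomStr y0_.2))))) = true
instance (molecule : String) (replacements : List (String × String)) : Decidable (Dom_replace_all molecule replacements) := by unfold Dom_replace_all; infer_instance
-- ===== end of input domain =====

-- B replaces A's repeated find/slice scan by one split per pattern, rejoining the two
-- halves of the segment list around each boundary (objective: alternative decomposition).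

-- ===== PORT A =====
-- A's while-loop over pos = molecule.find(pattern, start); fuel only makes the loop a
-- total Lean function (each iteration advances start by len(pattern) ≥ 1, so
-- molecule-length + 1 iterations always suffice; on an empty pattern — excluded by
-- Pre_ — the Python loop never terminates).
def pvLoopA (molecule pattern replacement : String) :
    Nat → Int → PySem.Set String → PySem.Set String
  | 0, _, acc => acc
  | fuel + 1, pos, acc =>
    if 0 ≤ pos then
      let new_molecule :=
        PySem.Str.slice molecule none (some pos) ++ replacement ++
          PySem.Str.slice molecule (some (pos + PySem.Str.len pattern)) none
      pvLoopA molecule pattern replacement fuel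
        (PySem.Str.findFrom molecule pattern (pos + PySem.Str.len pattern))
        (PySem.Set.add acc new_molecule)
    else acc

def replace_all (molecule : String) (replacements : List (String × String)) : List String :=
  replacements.foldl
    (fun new_molecules pr =>
      pvLoopA molecule pr.1 pr.2 (molecule.toList.length + 1)
        (PySem.Str.findFrom molecule pr.1 0) new_molecules)
    PySem.Set.empty

-- ===== PORT B =====
def replace_all_alt (molecule : String) (replacements : List (String × String)) : List String :=
  replacements.foldl
    (fun new_molecules pr =>
      match PySem.Str.split? molecule pr.1 with
      | none => new_molecules   -- molecule.split('') raises ValueError; outside Pre_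
      | some parts =>
        (PySem.List.pyRange 1 (parts.length : Int) 1).foldl
          (fun acc k =>
            PySem.Set.add acc
              (PySem.Str.join pr.1 (PySem.List.slice parts none (some k)) ++ pr.2 ++
               PySem.Str.join pr.1 (PySem.List.slice parts (some k) none)))
          new_molecules)
    PySem.Set.empty

-- ===== PRECONDITION & SPEC =====
-- Pre_ excludes replacement pairs with an empty pattern: there A's while loop never
-- terminates (molecule.find('', start) returns start forever) and B's split raises ValueError.
def Pre_replace_all (molecule : String) (replacements : List (String × String)) : Prop :=
  ∀ pr ∈ replacements, pr.1 ≠ ""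
instance (molecule : String) (replacements : List (String × String)) : Decidable (Pre_replace_all molecule replacements) := by unfold Pre_replace_all; infer_instance
def pvWitness_replace_all : String × (List (String × String)) := ("HOH", [("H", "HO"), ("O", "HH")])

def Spec_replace_all (molecule : String) (replacements : List (String × String)) (out : List String) : Prop := out = replace_all_alt molecule replacements
instance (molecule : String) (replacements : List (String × String)) (out : List String) : Decidable (Spec_replace_all molecule replacements out) := by unfold Spec_replace_all; infer_instance

-- ===== CLAIM (what is proved, stated in full; the proofs are below) =====
def Claim_equal_replace_all : Prop := ∀ (molecule : String) (replacements : List (String × String)), Dom_replace_all molecule replacements → Pre_replace_all molecule replacements → Spec_replace_all molecule replacements (replace_all molecule replacements)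

-- ===== LEMMAS AND PROOFS =====

theorem pv_find_go_eq (sub : List Char) : ∀ (l : List Char) (k : Nat),
    PySem.Chars.find.go sub l k =
      if PySem.Chars.find l sub = -1 then -1 else PySem.Chars.find l sub + (k : Int) := by
  intro l
  induction l with
  | nil =>
    intro k
    simp [PySem.Chars.find.go, PySem.Chars.find]
    split <;> simp_all
  | cons c rest ih =>
    intro k
    have hrfl : PySem.Chars.find (c :: rest) sub = PySem.Chars.find.go sub (c :: rest) 0 := rfl
    rw [PySem.Chars.find.go, hrfl, PySem.Chars.find.go]
    by_cases h : sub.isPrefixOf (c :: rest)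
    · simp [h]
    · have hge := PySem.Chars.neg_one_le_find rest sub
      rw [if_neg h, if_neg h, ih (k+1), ih 1]
      split_ifs <;> push_cast <;> omega

theorem pv_find_nil (p : List Char) (hp : p ≠ []) : PySem.Chars.find [] p = -1 := by
  simp [PySem.Chars.find, PySem.Chars.find.go, hp]

theorem pv_find_cons (p : List Char) (c : Char) (rest : List Char) :
    PySem.Chars.find (c :: rest) p =
      if p.isPrefixOf (c :: rest) then 0
      else if PySem.Chars.find rest p = -1 then -1 else PySem.Chars.find rest p + 1 := by
  have hrfl : PySem.Chars.find (c :: rest) p = PySem.Chars.find.go p (c :: rest) 0 := rfl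
  rw [hrfl, PySem.Chars.find.go]
  by_cases h : p.isPrefixOf (c :: rest)
  · simp [h]
  · simp [h, pv_find_go_eq]

def pvConsHead (x : List Char) : List (List Char) → List (List Char)
  | [] => [x]
  | y :: ys => (x ++ y) :: ys

def pvSplit (p : List Char) (s : List Char) : List (List Char) :=
  match s with
  | [] => [[]]
  | c :: rest =>
    if h : p ≠ [] ∧ p.isPrefixOf (c :: rest) then
      [] :: pvSplit p (List.drop p.length (c :: rest))
    else pvConsHead [c] (pvSplit p rest)
termination_by s.length
decreasing_by
  · simp only [List.length_drop]
    have : p.length ≠ 0 := fun hz => h.1 (List.eq_nil_of_length_eq_zero hz)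
    simp [List.length_cons]; omega
  · simp [List.length_cons]

theorem pvSplit_ne_nil (p s : List Char) : pvSplit p s ≠ [] := by
  fun_induction pvSplit p s with
  | case1 => simp
  | case2 => simp
  | case3 c rest h ih =>
    cases hs : pvSplit p rest with
    | nil => exact absurd hs ih
    | cons y ys => simp [pvConsHead, hs]

theorem pvConsHead_consHead (a b : List Char) (l : List (List Char)) :
    pvConsHead a (pvConsHead b l) = pvConsHead (a ++ b) l := by
  cases l <;> simp [pvConsHead]

theorem pv_splitOn_go_eq (p : List Char) (hp : p ≠ []) :
    ∀ (fuel : Nat) (l cur : List Char) (acc : List (List Char)), l.length ≤ fuel →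
      PySem.Chars.splitOn.go p fuel l cur acc =
        acc.reverse ++ pvConsHead cur.reverse (pvSplit p l) := by
  intro fuel
  induction fuel with
  | zero =>
    intro l cur acc hl
    have : l = [] := by simpa using List.length_eq_zero_iff.mp (Nat.le_zero.mp hl)
    subst this
    rw [PySem.Chars.splitOn.go]
    simp [pvSplit, pvConsHead]
  | succ fuel ih =>
    intro l cur acc hl
    cases l with
    | nil =>
      rw [PySem.Chars.splitOn.go]
      · simp [pvSplit, pvConsHead]
      · omega
    | cons c rest =>
      rw [PySem.Chars.splitOn.go]
      by_cases hpre : p.isPrefixOf (c :: rest)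
      · rw [if_pos hpre]
        have hplen : 1 ≤ p.length := by
          cases p with | nil => exact absurd rfl hp | cons a b => simp
        have hlen : (List.drop p.length (c :: rest)).length ≤ fuel := by
          simp only [List.length_drop] at *
          simp [List.length_cons] at hl ⊢
          omega
        rw [ih _ _ _ hlen]
        have hps : pvSplit p (c :: rest) = [] :: pvSplit p (List.drop p.length (c :: rest)) := by
          rw [pvSplit]; rw [dif_pos ⟨hp, hpre⟩]
        rw [hps]
        cases hq : pvSplit p (List.drop p.length (c :: rest)) with
        | nil => exact absurd hq (pvSplit_ne_nil _ _)
        | cons y ys => simp [pvConsHead]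
      · rw [if_neg hpre]
        have hlen : rest.length ≤ fuel := by simp [List.length_cons] at hl; omega
        rw [ih _ _ _ hlen]
        have hps : pvSplit p (c :: rest) = pvConsHead [c] (pvSplit p rest) := by
          rw [pvSplit]; rw [dif_neg (by simp [hpre])]
        rw [hps, pvConsHead_consHead]
        simp

theorem pv_splitOn_eq (p s : List Char) (hp : p ≠ []) :
    PySem.Chars.splitOn s p = pvSplit p s := by
  rw [PySem.Chars.splitOn, pv_splitOn_go_eq p hp _ _ _ _ (by omega)]
  cases hq : pvSplit p s with
  | nil => exact absurd hq (pvSplit_ne_nil _ _)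
  | cons y ys => simp [pvConsHead]

theorem pv_join_pvSplit (p s : List Char) (hp : p ≠ []) :
    PySem.Chars.join p (pvSplit p s) = s := by
  fun_induction pvSplit p s with
  | case1 => simp [PySem.Chars.join_singleton]
  | case2 c rest h ih =>
    cases hq : pvSplit p (List.drop p.length (c :: rest)) with
    | nil => exact absurd hq (pvSplit_ne_nil _ _)
    | cons y ys =>
      rw [hq] at ih
      rw [PySem.Chars.join_cons_cons, ih]
      simpa using List.prefix_iff_eq_append.mp (List.isPrefixOf_iff_prefix.mp h.2)
  | case3 c rest h ih =>
    cases hq : pvSplit p rest with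
    | nil => exact absurd hq (pvSplit_ne_nil _ _)
    | cons y ys =>
      rw [hq] at ih
      cases ys with
      | nil => simp [pvConsHead, PySem.Chars.join_singleton] at ih ⊢; simp [ih]
      | cons z zs =>
        simp only [pvConsHead, PySem.Chars.join_cons_cons] at ih ⊢
        simp [ih.symm]

theorem pvSplit_step (p s : List Char) (hp : p ≠ []) :
    pvSplit p s =
      if 0 ≤ PySem.Chars.find s p then
        s.take (PySem.Chars.find s p).toNat ::
          pvSplit p (s.drop ((PySem.Chars.find s p).toNat + p.length))
      else [s] := by
  generalize hn : s.length = n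
  induction n using Nat.strong_induction_on generalizing s with
  | _ n ih =>
  subst hn
  cases s with
  | nil =>
    rw [if_neg (by rw [pv_find_nil p hp]; omega)]
    simp [pvSplit]
  | cons c rest =>
    by_cases hpre : p.isPrefixOf (c :: rest)
    · have hf : PySem.Chars.find (c :: rest) p = 0 := by
        rw [pv_find_cons, if_pos hpre]
      rw [hf]
      rw [if_pos (by omega)]
      rw [pvSplit]; rw [dif_pos ⟨hp, hpre⟩]
      simp
    · have hf := pv_find_cons p c rest
      rw [if_neg hpre] at hf
      have hge := PySem.Chars.neg_one_le_find rest p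
      rw [pvSplit]; rw [dif_neg (by simp [hpre])]
      by_cases hr : PySem.Chars.find rest p = -1
      · rw [hf, if_pos hr, if_neg (by omega)]
        have := ih rest.length (by simp) rest rfl
        rw [if_neg (by omega)] at this
        rw [this]
        simp [pvConsHead]
      · rw [hf, if_neg hr]
        have hnn : 0 ≤ PySem.Chars.find rest p := by omega
        rw [if_pos (by omega)]
        have := ih rest.length (by simp) rest rfl
        rw [if_pos hnn] at this
        rw [this]
        have ht : (PySem.Chars.find rest p + 1).toNat = (PySem.Chars.find rest p).toNat + 1 := by
          omega
        rw [ht]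
        simp only [pvConsHead, List.take_succ_cons]
        congr 1
        rw [show (PySem.Chars.find rest p).toNat + 1 + p.length
              = ((PySem.Chars.find rest p).toNat + p.length) + 1 from by omega,
            List.drop_succ_cons]

def pvGen (p rep pre s : List Char) : List (List Char) :=
  if h : p ≠ [] ∧ 0 ≤ PySem.Chars.find s p then
    (pre ++ s.take (PySem.Chars.find s p).toNat ++ rep ++
        s.drop ((PySem.Chars.find s p).toNat + p.length)) ::
      pvGen p rep (pre ++ s.take (PySem.Chars.find s p).toNat ++ p)
        (s.drop ((PySem.Chars.find s p).toNat + p.length))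
  else []
termination_by s.length
decreasing_by
  have hspec := PySem.Chars.find_spec h.2
  have hle : (PySem.Chars.find s p).toNat + p.length ≤ s.length := by
    have hl := hspec.1.length_le
    rw [List.length_drop] at hl
    have hfl := PySem.Chars.find_le_length s p
    omega
  have hpl : p.length ≠ 0 := fun hz => h.1 (List.eq_nil_of_length_eq_zero hz)
  rw [List.length_drop]; omega

theorem pv_str_eq {s t : String} (h : s.toList = t.toList) : s = t := by
  rw [← String.ofList_toList (s := s), h, String.ofList_toList]

theorem pv_loopA_eq (m p rep : String) (hp : p.toList ≠ []) :
    ∀ (fuel k : Nat) (acc : PySem.Set String), k ≤ m.toList.length →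
      m.toList.length + 1 - k ≤ fuel →
      pvLoopA m p rep fuel (PySem.Str.findFrom m p (k : Int)) acc =
        (pvGen p.toList rep.toList (m.toList.take k) (m.toList.drop k)).foldl
          (fun a l => PySem.Set.add a (String.ofList l)) acc := by
  intro fuel
  induction fuel with
  | zero => intro k acc hk hf; omega
  | succ fuel ih =>
    intro k acc hk hf
    have hff : PySem.Str.findFrom m p (k : Int) =
        if PySem.Chars.find (m.toList.drop k) p.toList = -1 then -1
        else (k : Int) + PySem.Chars.find (m.toList.drop k) p.toList := by
      rw [PySem.Str.findFrom_eq, PySem.Chars.findFrom_natCast _ _ k hk]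
    by_cases hmiss : PySem.Chars.find (m.toList.drop k) p.toList = -1
    · rw [hff, if_pos hmiss, pvLoopA]
      rw [if_neg (by omega)]
      rw [pvGen, dif_neg (by simp [hmiss])]
      simp
    · have hge := PySem.Chars.neg_one_le_find (m.toList.drop k) p.toList
      have hnn : 0 ≤ PySem.Chars.find (m.toList.drop k) p.toList := by omega
      set f := PySem.Chars.find (m.toList.drop k) p.toList with hfdef
      have hspec := PySem.Chars.find_spec hnn
      have hflen := PySem.Chars.find_le_length (m.toList.drop k) p.toList
      have hjlen : f.toNat + p.toList.length ≤ m.toList.length - k := by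
        have hl := hspec.1.length_le
        simp only [List.length_drop] at hl hflen
        omega
      have hpl : 1 ≤ p.toList.length := by
        cases hq : p.toList with
        | nil => exact absurd hq hp
        | cons a b => simp
      rw [hff, if_neg hmiss, pvLoopA, if_pos (by omega)]
      -- the next start index
      have hlen_eq : PySem.Str.len p = (p.toList.length : Int) := by
        simp [PySem.Str.len_eq]
      have hk' : ((k : Int) + f + PySem.Str.len p) = ((k + f.toNat + p.toList.length : Nat) : Int) := by
        rw [hlen_eq]; push_cast; omega
      rw [hk']
      have hk'le : k + f.toNat + p.toList.length ≤ m.toList.length := by omega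
      rw [ih (k + f.toNat + p.toList.length) _ hk'le (by omega)]
      -- right-hand side: one step of pvGen
      conv_rhs => rw [pvGen]
      rw [dif_pos ⟨hp, hnn⟩]
      rw [List.foldl_cons]
      congr 1
      · -- accumulated set: the emitted molecule
        congr 1
        apply pv_str_eq
        simp only [String.toList_append, String.toList_ofList]
        rw [PySem.Str.toList_slice, PySem.Str.toList_slice,
          PySem.Chars.slice_eq_listSlice, PySem.Chars.slice_eq_listSlice,
          PySem.List.slice_to _ (by omega),
          PySem.List.slice_from _ (by omega : (0:Int) ≤ ((k + f.toNat + p.toList.length : Nat) : Int))]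
        have h1 : ((k : Int) + f).toNat = k + f.toNat := by omega
        have h2 : (((k + f.toNat + p.toList.length : Nat) : Int)).toNat = k + (f.toNat + p.toList.length) := by omega
        rw [h1, h2]
        rw [List.take_add, ← List.drop_drop]
      · -- the tail: prefixes and suffixes line up
        congr 1
        · -- take k' = take k ++ s.take j ++ p
          have hpre : p.toList = List.take p.toList.length (List.drop f.toNat (m.toList.drop k)) := by
            rw [← hfdef] at hspec
            exact List.prefix_iff_eq_take.mp hspec.1
          calc List.take (k + f.toNat + p.toList.length) m.toList
              = List.take k m.toList ++ List.take (f.toNat + p.toList.length) (m.toList.drop k) := by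
                rw [show k + f.toNat + p.toList.length = k + (f.toNat + p.toList.length) from by omega,
                  List.take_add]
            _ = List.take k m.toList ++ (List.take f.toNat (m.toList.drop k) ++
                  List.take p.toList.length (List.drop f.toNat (m.toList.drop k))) := by
                rw [List.take_add]
            _ = List.take k m.toList ++ List.take f.toNat (m.toList.drop k) ++ p.toList := by
                rw [← hpre, List.append_assoc]
        · rw [List.drop_drop]
          congr 1
          omega

theorem pv_genB (p rep : List Char) (hp : p ≠ []) :
    ∀ (s pre : List Char),
      (List.range' 1 ((pvSplit p s).length - 1)).map
          (fun k => pre ++ PySem.Chars.join p ((pvSplit p s).take k) ++ rep ++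
            PySem.Chars.join p ((pvSplit p s).drop k))
        = pvGen p rep pre s := by
  intro s
  generalize hn : s.length = n
  induction n using Nat.strong_induction_on generalizing s with
  | _ n ih =>
  subst hn
  intro pre
  by_cases hnn : 0 ≤ PySem.Chars.find s p
  · set j := (PySem.Chars.find s p).toNat with hj
    set s' := s.drop (j + p.length) with hs'
    have hstep : pvSplit p s = s.take j :: pvSplit p s' := by
      rw [pvSplit_step p s hp, if_pos hnn]
    have hspec := PySem.Chars.find_spec hnn
    have hflen := PySem.Chars.find_le_length s p
    have hpl : 1 ≤ p.length := by
      cases hq : p with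
      | nil => exact absurd hq hp
      | cons a b => simp
    have hjle : j + p.length ≤ s.length := by
      have hl := hspec.1.length_le
      rw [List.length_drop] at hl
      omega
    have hs'len : s'.length < s.length := by
      rw [hs', List.length_drop]; omega
    have hne := pvSplit_ne_nil p s'
    cases hq : pvSplit p s' with
    | nil => exact absurd hq hne
    | cons y ys =>
    have hlen : (pvSplit p s).length - 1 = ys.length + 1 := by
      rw [hstep, hq]; simp
    rw [hlen, hstep, hq]
    rw [pvGen, dif_pos ⟨hp, hnn⟩]
    rw [List.range'_succ, List.map_cons]
    congr 1
    · -- boundary k = 1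
      simp only [List.take_succ_cons, List.take_zero, List.drop_succ_cons, List.drop_zero]
      rw [PySem.Chars.join_singleton]
      have : PySem.Chars.join p (y :: ys) = s' := by
        rw [← hq]; exact pv_join_pvSplit p s' hp
      rw [this]
    · -- boundaries k ≥ 2 are the boundaries k ≥ 1 of s' shifted by one
      have ihs := ih s'.length hs'len s' rfl (pre ++ s.take j ++ p)
      rw [hq] at ihs
      simp only [List.length_cons, Nat.add_sub_cancel] at ihs
      rw [← ihs]
      rw [List.range'_eq_map_range, List.range'_eq_map_range, List.map_map, List.map_map]
      apply List.map_congr_left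
      intro k _
      simp only [Function.comp_apply]
      have htake : List.take (2 + k) (s.take j :: y :: ys) =
          s.take j :: List.take (1 + k) (y :: ys) := by
        rw [show 2 + k = (1 + k) + 1 from by omega, List.take_succ_cons]
      have hdrop : List.drop (2 + k) (s.take j :: y :: ys) =
          List.drop (1 + k) (y :: ys) := by
        rw [show 2 + k = (1 + k) + 1 from by omega, List.drop_succ_cons]
      rw [htake, hdrop]
      cases hyk : List.take (1 + k) (y :: ys) with
      | nil => simp at hyk
      | cons z zs =>
        rw [PySem.Chars.join_cons_cons]
        simp [List.append_assoc]
  · rw [pvSplit_step p s hp, if_neg hnn, pvGen, dif_neg (by simp [hnn])]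
    simp

theorem pv_inner_eq (m : String) (pr : String × String) (hp : pr.1.toList ≠ [])
    (acc : PySem.Set String) :
    (match PySem.Str.split? m pr.1 with
      | none => acc
      | some parts =>
        (PySem.List.pyRange 1 (parts.length : Int) 1).foldl
          (fun acc k =>
            PySem.Set.add acc
              (PySem.Str.join pr.1 (PySem.List.slice parts none (some k)) ++ pr.2 ++
               PySem.Str.join pr.1 (PySem.List.slice parts (some k) none)))
          acc)
      = (pvGen pr.1.toList pr.2.toList [] m.toList).foldl
          (fun a l => PySem.Set.add a (String.ofList l)) acc := by
  have hsplit : PySem.Str.split? m pr.1 =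
      some ((pvSplit pr.1.toList m.toList).map String.ofList) := by
    rw [PySem.Str.split?, PySem.Chars.split?]
    rw [if_neg (by simpa using hp)]
    rw [pv_splitOn_eq _ _ hp]
    rfl
  cases hsp : PySem.Str.split? m pr.1 with
  | none => rw [hsplit] at hsp; cases hsp
  | some parts =>
  rw [hsplit] at hsp
  injection hsp with hparts
  subst hparts
  dsimp only
  rw [← pv_genB pr.1.toList pr.2.toList hp m.toList []]
  set partsC := pvSplit pr.1.toList m.toList with hpc
  have hlen : (partsC.map String.ofList).length = partsC.length := by simp
  rw [hlen]
  rw [PySem.List.pyRange_one, List.range'_eq_map_range]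
  have harg : ((partsC.length : Int) - 1).toNat = partsC.length - 1 := by omega
  rw [harg]
  rw [List.foldl_map, List.foldl_map, List.foldl_map]
  apply PySem.List.foldl_congr_mem
  intro a k _
  congr 1
  apply pv_str_eq
  simp only [String.toList_append, String.toList_ofList]
  rw [PySem.List.slice_to _ (by omega : (0:Int) ≤ 1 + (k:Int)),
    PySem.List.slice_from _ (by omega : (0:Int) ≤ 1 + (k:Int))]
  have hk : ((1:Int) + (k:Int)).toNat = 1 + k := by omega
  rw [hk]
  rw [← List.map_take, ← List.map_drop]
  rw [PySem.Str.toList_join, PySem.Str.toList_join]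
  simp [Function.comp_def]

theorem pv_final (molecule : String) (replacements : List (String × String))
    (hPre : Pre_replace_all molecule replacements) :
    replace_all molecule replacements = replace_all_alt molecule replacements := by
  unfold replace_all replace_all_alt
  apply PySem.List.foldl_congr_mem
  intro acc pr hmem
  have hp : pr.1.toList ≠ [] := fun hz => hPre pr hmem (String.toList_eq_nil_iff.mp hz)
  rw [show (0 : Int) = ((0 : Nat) : Int) from rfl]
  rw [pv_loopA_eq molecule pr.1 pr.2 hp (molecule.toList.length + 1) 0 acc (by omega) (by omega)]
  rw [List.take_zero, List.drop_zero]
  exact (pv_inner_eq molecule pr hp acc).symm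

-- ===== VERDICT (by name: the statement is the Claim_ definition above) =====
theorem replace_all_spec : Claim_equal_replace_all := by
  intro molecule replacements _hDom hPre
  unfold Spec_replace_all
  exact pv_final molecule replacements hPre
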